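-- pv_equiv track=rewrite | github.com/canay/dendritic-ann-benchmarks | dann_benchmark/src/models.py | estimate_param_matched_width
-- ===== SOURCE A (Python) =====
-- def estimate_param_matched_width(target_params: int, input_dim: int, num_classes: int) -> int:
--     best_w = 2
--     best_diff = float("inf")
--     for w in range(2, 4097):
--         params = (input_dim + 1) * w + (w + 1) * w + (w + 1) * num_classes
--         diff = abs(params - target_params)
--         if diff < best_diff:
--             best_diff = diff
--             best_w = w
--     return best_w
-- ===== SOURCE B (Python) =====
-- def estimate_param_matched_width(target_params: int, input_dim: int, num_classes: int) -> int:
--     # params simplifies to the monic quadratic w*w + b*w + num_classes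
--     b = input_dim + num_classes + 2
--
--     def key(w):
--         return abs(w * w + b * w + num_classes - target_params)
--
--     # pass 1: the minimal difference over all widths
--     m = key(2)
--     for w in range(3, 4097):
--         m = min(m, key(w))
--     # pass 2: the smallest width attaining it (always found, since m is attained)
--     for w in range(2, 4097):
--         if key(w) == m:
--             return w
-- ===== Notes on version B (the rewrite author's own statement) =====
-- stated objective: alternative
-- what changed: Replaces the single-pass running-best accumulator (best width + best diff pair with strict-less update) by an algebraically simplified monic-quadratic key and a two-pass scheme: first fold the minimum difference value, then return the first width attaining it.
import Mathlib
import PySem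

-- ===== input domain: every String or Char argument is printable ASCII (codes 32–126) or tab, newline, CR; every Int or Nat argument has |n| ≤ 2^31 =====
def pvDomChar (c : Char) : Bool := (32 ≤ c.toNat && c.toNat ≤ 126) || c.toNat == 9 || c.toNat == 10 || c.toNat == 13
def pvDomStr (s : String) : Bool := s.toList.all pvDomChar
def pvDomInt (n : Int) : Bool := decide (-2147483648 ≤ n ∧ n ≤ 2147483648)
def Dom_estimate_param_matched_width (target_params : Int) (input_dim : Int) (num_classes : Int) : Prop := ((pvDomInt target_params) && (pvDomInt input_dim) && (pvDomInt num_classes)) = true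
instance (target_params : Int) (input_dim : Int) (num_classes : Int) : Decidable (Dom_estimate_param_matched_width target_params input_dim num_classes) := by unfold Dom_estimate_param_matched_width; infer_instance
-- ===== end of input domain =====

-- B replaces A's single-pass running-best (width, diff) accumulator by a simplified
-- monic-quadratic key and a two-pass min-value-then-first-attainer scheme (alternative
-- decomposition, same O(W) cost over the fixed width range).

-- ===== PORT A =====
-- best_diff = float("inf") before any iteration is modelled as `none`; the branch
-- `diff < best_diff` is always taken when the state is `none`, exactly as in Python.
-- pvStepA is the loop body of A, verbatim.
def pvStepA (target_params : Int) (input_dim : Int) (num_classes : Int)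
    (st : Int × Option Int) (w : Int) : Int × Option Int :=
  let params := (input_dim + 1) * w + (w + 1) * w + (w + 1) * num_classes
  let diff := |params - target_params|
  let upd : Bool := match st.2 with
    | none => true
    | some d => decide (diff < d)
  if upd then (w, some diff) else st

-- pvRunA runs A's loop over the given range of widths and returns best_w.
def pvRunA (target_params : Int) (input_dim : Int) (num_classes : Int) (ws : List Int) : Int :=
  (ws.foldl (pvStepA target_params input_dim num_classes) (2, none)).1

def estimate_param_matched_width (target_params : Int) (input_dim : Int) (num_classes : Int) : Int :=
  pvRunA target_params input_dim num_classes (PySem.List.pyRange 2 4097 1)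

-- ===== PORT B =====
def pvKey (target_params : Int) (input_dim : Int) (num_classes : Int) (w : Int) : Int :=
  |w * w + (input_dim + num_classes + 2) * w + num_classes - target_params|

def estimate_param_matched_width_alt (target_params : Int) (input_dim : Int) (num_classes : Int) : Int :=
  let m := (PySem.List.pyRange 3 4097 1).foldl
    (fun a w => min a (pvKey target_params input_dim num_classes w))
    (pvKey target_params input_dim num_classes 2)
  -- Python's second loop returns the first matching width; it always finds one since m
  -- is attained, so the `.getD 2` default is unreachable.
  ((PySem.List.pyRange 2 4097 1).find?
    (fun w => pvKey target_params input_dim num_classes w == m)).getD 2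

-- ===== PRECONDITION & SPEC =====
def Spec_estimate_param_matched_width (target_params : Int) (input_dim : Int) (num_classes : Int) (out : Int) : Prop := out = estimate_param_matched_width_alt target_params input_dim num_classes
instance (target_params : Int) (input_dim : Int) (num_classes : Int) (out : Int) : Decidable (Spec_estimate_param_matched_width target_params input_dim num_classes out) := by unfold Spec_estimate_param_matched_width; infer_instance

-- ===== CLAIM (what is proved, stated in full; the proofs are below) =====
def Claim_equal_estimate_param_matched_width : Prop := ∀ (target_params : Int) (input_dim : Int) (num_classes : Int), Dom_estimate_param_matched_width target_params input_dim num_classes → Spec_estimate_param_matched_width target_params input_dim num_classes (estimate_param_matched_width target_params input_dim num_classes)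

-- ===== LEMMAS AND PROOFS =====

-- A's key equals B's key (algebraic identity).
theorem pvKeyA_eq (t i c w : Int) :
    |(i + 1) * w + (w + 1) * w + (w + 1) * c - t| = pvKey t i c w := by
  unfold pvKey; ring_nf

-- abstract first-argmin recursion (invariant: stored best diff = key of stored best w)
def pvFa (k : Int → Int) : List Int → Int → Int
  | [], bw => bw
  | x :: xs, bw => if k x < k bw then pvFa k xs x else pvFa k xs bw

def pvM (k : Int → Int) (xs : List Int) (b : Int) : Int :=
  xs.foldl (fun a x => min a (k x)) b

theorem pvM_cons (k : Int → Int) (x : Int) (xs : List Int) (b : Int) :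
    pvM k (x :: xs) b = pvM k xs (min b (k x)) := rfl

theorem pvM_le (k : Int → Int) (xs : List Int) (b : Int) : pvM k xs b ≤ b := by
  induction xs generalizing b with
  | nil => simp [pvM]
  | cons x xs ih =>
    calc pvM k (x :: xs) b = pvM k xs (min b (k x)) := rfl
      _ ≤ min b (k x) := ih _
      _ ≤ b := min_le_left _ _

-- one step of A from an invariant state
theorem pvStepA_eq (t i c : Int) (bw x : Int) :
    pvStepA t i c (bw, some (pvKey t i c bw)) x =
      if pvKey t i c x < pvKey t i c bw then (x, some (pvKey t i c x))
      else (bw, some (pvKey t i c bw)) := by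
  show (if decide (|(i + 1) * x + (x + 1) * x + (x + 1) * c - t| < pvKey t i c bw) = true
        then (x, some |(i + 1) * x + (x + 1) * x + (x + 1) * c - t|)
        else (bw, some (pvKey t i c bw))) = _
  rw [pvKeyA_eq t i c x]
  simp only [decide_eq_true_eq]

-- A's first loop iteration from the infinity state
theorem pvStepA_none (t i c bw x : Int) :
    pvStepA t i c (bw, none) x = (x, some (pvKey t i c x)) := by
  show (x, some |(i + 1) * x + (x + 1) * x + (x + 1) * c - t|) = _
  rw [pvKeyA_eq t i c x]

-- A's fold with a `some` state computes pvFa.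
theorem pvFoldA_eq_fa (t i c : Int) (xs : List Int) (bw : Int) :
    (xs.foldl (pvStepA t i c) (bw, some (pvKey t i c bw))).1 = pvFa (pvKey t i c) xs bw := by
  induction xs generalizing bw with
  | nil => rfl
  | cons x xs ih =>
    rw [List.foldl_cons, pvStepA_eq]
    by_cases h : pvKey t i c x < pvKey t i c bw
    · rw [if_pos h, ih x]; simp [pvFa, h]
    · rw [if_neg h, ih bw]; simp [pvFa, h]

-- the key characterization: first-argmin = first attainer of the running minimum
theorem pvFa_char (k : Int → Int) (xs : List Int) (bw d : Int) :
    pvFa k xs bw =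
      ((bw :: xs).find? (fun x => k x == pvM k xs (k bw))).getD d := by
  induction xs generalizing bw d with
  | nil => simp [pvFa, pvM, List.find?]
  | cons x xs ih =>
    by_cases h : k x < k bw
    · have hM : pvM k (x :: xs) (k bw) = pvM k xs (k x) := by
        rw [pvM_cons, min_eq_right (le_of_lt h)]
      have hlt : pvM k xs (k x) < k bw := lt_of_le_of_lt (pvM_le k xs (k x)) h
      have hbw : (k bw == pvM k xs (k x)) = false := beq_eq_false_iff_ne.mpr (by omega)
      simp only [pvFa, if_pos h, hM, List.find?_cons, hbw]
      exact ih x d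
    · have hle : k bw ≤ k x := le_of_not_gt h
      have hM : pvM k (x :: xs) (k bw) = pvM k xs (k bw) := by
        rw [pvM_cons, min_eq_left hle]
      have hMle : pvM k xs (k bw) ≤ k bw := pvM_le k xs (k bw)
      simp only [pvFa, if_neg h, hM]
      rw [ih bw d]
      by_cases hb : k bw = pvM k xs (k bw)
      · have hbt : (k bw == pvM k xs (k bw)) = true := beq_iff_eq.mpr hb
        simp only [List.find?_cons, hbt]
      · have hbw : (k bw == pvM k xs (k bw)) = false := beq_eq_false_iff_ne.mpr hb
        have hxM : (k x == pvM k xs (k bw)) = false := beq_eq_false_iff_ne.mpr (by omega)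
        simp only [List.find?_cons, hbw, hxM]

-- A's whole loop over any nonempty width list is the first-argmin recursion.
theorem pvRunA_char (t i c x : Int) (xs : List Int) :
    pvRunA t i c (x :: xs) = pvFa (pvKey t i c) xs x := by
  show (xs.foldl (pvStepA t i c) (pvStepA t i c (2, none) x)).1 = _
  rw [pvStepA_none]
  exact pvFoldA_eq_fa t i c xs x

-- ===== VERDICT (by name: the statement is the Claim_ definition above) =====
theorem estimate_param_matched_width_spec : Claim_equal_estimate_param_matched_width := by
  intro t i c _
  show estimate_param_matched_width t i c = estimate_param_matched_width_alt t i c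
  have hcons : PySem.List.pyRange 2 4097 1 = 2 :: PySem.List.pyRange 3 4097 1 := by
    have h := PySem.List.pyRange_one_cons (a := 2) (b := 4097) (by norm_num)
    norm_num at h
    exact h
  simp only [estimate_param_matched_width, estimate_param_matched_width_alt]
  rw [hcons, pvRunA_char]
  exact pvFa_char (pvKey t i c) _ 2 2
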